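-- pv_equiv track=rewrite | github.com/Henrique-Gomes/Maximum_Flow | Maximum_Flow.py | vetor
-- ===== SOURCE A (Python) =====
-- def vetor(M,orig,dest):
-- 	vet = []
-- 	for i in range(0,len(M)):
-- 		entrada = 0
-- 		saida = 0
-- 		for j in range(0,len(M)):
-- 			saida += M[i][j]
-- 		for j in range(0,len(M)):
-- 			entrada += M[j][i]
--
-- 		if i==orig: 	#origem pode não ter entradas
-- 			vet.append(saida)
-- 		elif i==dest:	# destino pode não ter saídas
-- 			vet.append(entrada)
-- 		else:
-- 			vet.append(min(entrada,saida))
-- 	return vet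
-- ===== SOURCE B (Python) =====
-- def vetor(M, orig, dest):
--     # Build the row-sum and column-sum tables in one pass over the rows,
--     # then select per node in a second pass.
--     n = len(M)
--     row_sum = []
--     col_sum = [0] * n
--     for row in M:
--         s = 0
--         for j in range(n):
--             s += row[j]
--         row_sum.append(s)
--         col_sum = [col_sum[j] + row[j] for j in range(n)]
--     out = []
--     for i in range(n):
--         if i == orig:
--             out.append(row_sum[i])
--         elif i == dest:
--             out.append(col_sum[i])
--         else:
--             out.append(min(col_sum[i], row_sum[i]))
--     return out
-- ===== Notes on version B (the rewrite author's own statement) =====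
-- stated objective: alternative
-- what changed: B builds row-sum and column-sum tables in a single pass over the rows (rebuilding the column table functionally per row) and then runs a separate selection pass, instead of A's per-node rescanning of a full row and a full column for every index.
import Mathlib
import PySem

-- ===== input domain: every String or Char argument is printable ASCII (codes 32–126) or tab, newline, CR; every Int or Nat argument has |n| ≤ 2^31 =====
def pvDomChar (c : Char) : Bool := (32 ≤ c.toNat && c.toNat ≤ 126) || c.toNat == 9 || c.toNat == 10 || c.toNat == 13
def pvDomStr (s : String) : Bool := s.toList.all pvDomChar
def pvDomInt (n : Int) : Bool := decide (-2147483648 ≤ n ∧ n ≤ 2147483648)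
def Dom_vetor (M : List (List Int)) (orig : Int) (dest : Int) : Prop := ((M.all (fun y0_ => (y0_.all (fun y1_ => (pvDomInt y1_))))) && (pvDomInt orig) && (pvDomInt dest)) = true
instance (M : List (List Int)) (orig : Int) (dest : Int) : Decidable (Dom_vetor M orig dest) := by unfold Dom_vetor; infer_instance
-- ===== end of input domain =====

-- B builds the row/column sum tables in one pass then selects per node, instead of A's per-node row+column rescans; alternative decomposition, same cost.


-- ===== PORT A =====
-- literal port of A: for each i, scan row i (saida), scan column i (entrada), append the selected value
def vetor (M : List (List Int)) (orig : Int) (dest : Int) : List Int :=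
  let n : Int := M.length
  (PySem.List.pyRange 0 n 1).foldl (fun vet i =>
    let saida := (PySem.List.pyRange 0 n 1).foldl
      (fun s j => s + PySem.List.pyGetD (PySem.List.pyGetD M i []) j 0) 0
    let entrada := (PySem.List.pyRange 0 n 1).foldl
      (fun s j => s + PySem.List.pyGetD (PySem.List.pyGetD M j []) i 0) 0
    vet ++ [if i = orig then saida else if i = dest then entrada else min entrada saida]) []

-- ===== PORT B =====
-- one step of B's table-building pass: append this row's sum, rebuild the column-sum table
def vetorAltStep (n : Int) (acc : List Int × List Int) (row : List Int) : List Int × List Int :=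
  let s := (PySem.List.pyRange 0 n 1).foldl (fun s j => s + PySem.List.pyGetD row j 0) 0
  (acc.1 ++ [s],
   (PySem.List.pyRange 0 n 1).map (fun j => PySem.List.pyGetD acc.2 j 0 + PySem.List.pyGetD row j 0))

def vetor_alt (M : List (List Int)) (orig : Int) (dest : Int) : List Int :=
  let n : Int := M.length
  let rc := M.foldl (vetorAltStep n) ([], List.replicate n.toNat 0)
  (PySem.List.pyRange 0 n 1).foldl (fun out i =>
    out ++ [if i = orig then PySem.List.pyGetD rc.1 i 0
            else if i = dest then PySem.List.pyGetD rc.2 i 0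
            else min (PySem.List.pyGetD rc.2 i 0) (PySem.List.pyGetD rc.1 i 0)]) []

-- ===== PRECONDITION & SPEC =====
-- Pre_ excludes exactly the inputs where Python A raises IndexError: some row shorter than len(M).
def Pre_vetor (M : List (List Int)) (orig : Int) (dest : Int) : Prop :=
  ∀ row ∈ M, M.length ≤ row.length
instance (M : List (List Int)) (orig : Int) (dest : Int) : Decidable (Pre_vetor M orig dest) := by unfold Pre_vetor; infer_instance
def pvWitness_vetor : List (List Int) × Int × Int := ([[1, 2], [3, 4]], 0, 1)

def Spec_vetor (M : List (List Int)) (orig : Int) (dest : Int) (out : List Int) : Prop := out = vetor_alt M orig dest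
instance (M : List (List Int)) (orig : Int) (dest : Int) (out : List Int) : Decidable (Spec_vetor M orig dest out) := by unfold Spec_vetor; infer_instance

-- ===== CLAIM (what is proved, stated in full; the proofs are below) =====
def Claim_equal_vetor : Prop := ∀ (M : List (List Int)) (orig : Int) (dest : Int), Dom_vetor M orig dest → Pre_vetor M orig dest → Spec_vetor M orig dest (vetor M orig dest)

-- ===== LEMMAS AND PROOFS =====

-- row sum of a single row, as both ports compute it
def rowSum (n : Int) (row : List Int) : Int :=
  (PySem.List.pyRange 0 n 1).foldl (fun s j => s + PySem.List.pyGetD row j 0) 0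

-- invariant of B's table-building fold
theorem vetorAlt_tables (n : Int) (L : List (List Int)) (rs : List Int) (g : Int → Int) :
    L.foldl (vetorAltStep n) (rs, (PySem.List.pyRange 0 n 1).map g) =
    (rs ++ L.map (rowSum n),
     (PySem.List.pyRange 0 n 1).map
       (fun j => L.foldl (fun s row => s + PySem.List.pyGetD row j 0) (g j))) := by
  induction L generalizing rs g with
  | nil => simp
  | cons row L ih =>
    simp only [List.foldl_cons]
    have hstep : vetorAltStep n (rs, (PySem.List.pyRange 0 n 1).map g) row =
        (rs ++ [rowSum n row],
         (PySem.List.pyRange 0 n 1).map (fun j => g j + PySem.List.pyGetD row j 0)) := by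
      unfold vetorAltStep rowSum
      refine Prod.ext rfl ?_
      simp only
      refine List.map_congr_left (fun j hj => ?_)
      rw [PySem.List.mem_pyRange_one] at hj
      rw [PySem.List.pyGetD_map_pyRange_of_nonneg g n j 0 hj.1 hj.2]
    rw [hstep, ih]
    simp

theorem replicate_eq_map_pyRange (n : Int) :
    List.replicate n.toNat (0 : Int) = (PySem.List.pyRange 0 n 1).map (fun _ => 0) := by
  rw [List.map_const', PySem.List.length_pyRange_one]
  norm_num

-- ===== VERDICT (by name: the statement is the Claim_ definition above) =====
theorem vetor_spec : Claim_equal_vetor := by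
  intro M orig dest _ _
  unfold Spec_vetor vetor vetor_alt
  simp only
  rw [replicate_eq_map_pyRange, vetorAlt_tables]
  simp only [List.nil_append]
  rw [PySem.List.foldl_append_singleton_eq_map, PySem.List.foldl_append_singleton_eq_map]
  refine List.map_congr_left (fun i hi => ?_)
  rw [PySem.List.mem_pyRange_one] at hi
  obtain ⟨h0, hn⟩ := hi
  have hlen : i.toNat < M.length := by omega
  have hrs : PySem.List.pyGetD (M.map (rowSum (M.length : Int))) i 0 =
      (PySem.List.pyRange 0 (M.length : Int) 1).foldl
        (fun s j => s + PySem.List.pyGetD (PySem.List.pyGetD M i []) j 0) 0 := by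
    rw [PySem.List.pyGetD_eq_getElem _ 0 h0 (by simpa using hn)]
    rw [PySem.List.pyGetD_eq_getElem M [] h0 (by simpa using hn)]
    simp [rowSum]
  have hcs : PySem.List.pyGetD
      ((PySem.List.pyRange 0 (M.length : Int) 1).map
        (fun j => M.foldl (fun s row => s + PySem.List.pyGetD row j 0) 0)) i 0 =
      (PySem.List.pyRange 0 (M.length : Int) 1).foldl
        (fun s j => s + PySem.List.pyGetD (PySem.List.pyGetD M j []) i 0) 0 := by
    rw [PySem.List.pyGetD_map_pyRange_of_nonneg _ _ _ _ h0 hn]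
    rw [PySem.List.foldl_pyRange_zero_pyGetD' M ([] : List Int)
      (fun s row => s + PySem.List.pyGetD row i 0) 0]
  rw [hrs, hcs]
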